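-- pv_equiv track=rewrite | github.com/kostiscpp/advent_of_code_2024 | day12/12.py | count_areas
-- ===== SOURCE A (Python) =====
-- def is_convex(x, y, n, m, G, char):
-- 	return (not(0 <= x < n and 0 <= y < m) or G[x][y] != char)
--
-- def same(x, y, n, m, G, char):
-- 	return 0 <= x < n and 0 <= y < m and G[x][y] == char
--
-- def visit(G, s , visited):
-- 	dirs = [(1, 0), (0, 1), (-1, 0), (0, -1)]
-- 	queue = [s]
-- 	char = G[s[0]][s[1]]
-- 	visited.add(s)
-- 	coords = [s]
-- 	n, m = len(G), len(G[0])
-- 	ans = 0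
-- 	area = 1
-- 	while queue:
-- 		x, y = queue.pop(0)
-- 		for i in range(len(dirs)):
-- 			xn, yn = x + dirs[i][0], y + dirs[i][1]
-- 			if 0 <= xn < n and 0 <= yn < m and (xn, yn) not in visited:
-- 				if G[xn][yn] == char:
-- 					queue.append((xn, yn))
-- 					visited.add((xn, yn))
-- 					area += 1
-- 			xnn, ynn = x +  dirs[(i + 1) % 4][0], y + dirs[(i + 1) % 4][1]
-- 			xdn, ydn = xn + xnn - x, yn + ynn - y
-- 			ans += (is_convex(xn, yn, n, m, G, char) and is_convex(xnn, ynn, n, m, G, char))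
-- 			ans += (is_convex(xdn, ydn, n, m, G, char) and same(xn, yn, n, m, G, char) and same(xnn, ynn, n, m, G, char))
-- 	return ans * area, visited
--
-- def count_areas(G):
-- 	visited = set()
-- 	ans = 0
-- 	for r in range(len(G)):
-- 		for c in range(len(G[0])):
-- 			if (r, c) not in visited:
-- 				counted , visited = visit(G, (r, c), visited)
-- 				ans += counted
-- 	return ans
-- ===== SOURCE B (Python) =====
-- def count_areas(G):
--     n = len(G)
--     m = len(G[0]) if G else 0
--     label = {}
--     for r in range(n):
--         for c in range(m):
--             label[(r, c)] = r * m + c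
--     for _ in range(n * m * n * m):
--         changed = False
--         for r in range(n):
--             for c in range(m):
--                 for rr, cc in ((r - 1, c), (r + 1, c), (r, c - 1), (r, c + 1)):
--                     if 0 <= rr < n and 0 <= cc < m and G[rr][cc] == G[r][c] and label[(rr, cc)] < label[(r, c)]:
--                         label[(r, c)] = label[(rr, cc)]
--                         changed = True
--         if not changed:
--             break
--     size = {}
--     for r in range(n):
--         for c in range(m):
--             size[label[(r, c)]] = size.get(label[(r, c)], 0) + 1
--     total = 0
--     for r in range(n):
--         for c in range(m):
--             total += _corners(G, r, c, n, m) * size[label[(r, c)]]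
--     return total
--
-- def _corners(G, r, c, n, m):
--     def diff(x, y):
--         return not (0 <= x < n and 0 <= y < m) or G[x][y] != G[r][c]
--     cnt = 0
--     for (dr1, dc1), (dr2, dc2) in (((-1, 0), (0, 1)), ((0, 1), (1, 0)), ((1, 0), (0, -1)), ((0, -1), (-1, 0))):
--         a = diff(r + dr1, c + dc1)
--         b = diff(r + dr2, c + dc2)
--         if a and b:
--             cnt += 1
--         elif not a and not b and diff(r + dr1 + dr2, c + dc1 + dc2):
--             cnt += 1
--     return cnt
-- ===== Notes on version B (the rewrite author's own statement) =====
-- stated objective: alternative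
-- what changed: Replaces the BFS flood fill with interleaved corner counting by a fixed-point connected-component labeling: every cell starts with its own index, repeated full-grid sweeps propagate the minimum label across equal-character neighbors until no label changes, then a counting pass sizes each label class and a final pass sums per-cell corner contributions times the class size.
import Mathlib
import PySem

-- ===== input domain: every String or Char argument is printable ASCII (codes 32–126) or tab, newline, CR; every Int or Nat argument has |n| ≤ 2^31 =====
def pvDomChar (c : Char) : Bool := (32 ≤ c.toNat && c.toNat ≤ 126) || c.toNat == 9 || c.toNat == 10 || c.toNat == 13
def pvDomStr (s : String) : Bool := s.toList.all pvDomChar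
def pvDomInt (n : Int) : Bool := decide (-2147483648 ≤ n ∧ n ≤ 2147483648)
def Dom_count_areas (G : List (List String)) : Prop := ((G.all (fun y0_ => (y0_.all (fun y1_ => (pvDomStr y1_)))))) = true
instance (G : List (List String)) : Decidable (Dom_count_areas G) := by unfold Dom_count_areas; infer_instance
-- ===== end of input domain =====

-- B replaces A's BFS flood fill with interleaved corner counting by fixed-point connected-component
-- labeling (min-label propagation sweeps until stable), then a sizing pass and a per-cell corner
-- pass (alternative algorithm, not claimed faster). Python A threads a `visited` set; only the
-- return value is compared here (B performs no mutation of shared state).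

-- G[x][y], total form; wherever Python A/B evaluate G[x][y] inside Pre_ it is in range and exact
def pvGet (G : List (List String)) (x y : Int) : String :=
  (PySem.List.pyGet? ((PySem.List.pyGet? G x).getD []) y).getD ""

-- 0 <= x < n and 0 <= y < m
def pvInb (x y n m : Int) : Bool := decide (0 ≤ x ∧ x < n ∧ 0 ≤ y ∧ y < m)

-- ===== PORT A =====
def is_convex (x y n m : Int) (G : List (List String)) (char : String) : Bool :=
  !(pvInb x y n m) || (pvGet G x y != char)

def pvSame (x y n m : Int) (G : List (List String)) (char : String) : Bool :=
  pvInb x y n m && (pvGet G x y == char)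

def pvDirs : List (Int × Int) := [(1, 0), (0, 1), (-1, 0), (0, -1)]

-- the body of visit's `for i in range(len(dirs))` loop
def visitInner (G : List (List String)) (char : String) (n m x y : Int)
    (st : List (Int × Int) × PySem.Set (Int × Int) × Int × Int) (i : Nat) :
    List (Int × Int) × PySem.Set (Int × Int) × Int × Int :=
  let q := st.1; let vis := st.2.1; let ans := st.2.2.1; let area := st.2.2.2
  let d := pvDirs.getD i (0, 0)
  let d2 := pvDirs.getD ((i + 1) % 4) (0, 0)
  let xn := x + d.1
  let yn := y + d.2
  let qva :=
    if pvInb xn yn n m && !(PySem.Set.contains vis (xn, yn)) then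
      (if pvGet G xn yn == char then (q ++ [(xn, yn)], PySem.Set.add vis (xn, yn), area + 1)
       else (q, vis, area))
    else (q, vis, area)
  let xnn := x + d2.1
  let ynn := y + d2.2
  let xdn := xn + xnn - x
  let ydn := yn + ynn - y
  let ans := ans + (if is_convex xn yn n m G char && is_convex xnn ynn n m G char then 1 else 0)
  let ans := ans +
    (if is_convex xdn ydn n m G char && pvSame xn yn n m G char && pvSame xnn ynn n m G char
     then 1 else 0)
  (qva.1, qva.2.1, ans, qva.2.2)

-- visit's `while queue` loop (fuel only makes the recursion total; it is proved sufficient below)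
def visitLoop (G : List (List String)) (char : String) (n m : Int) :
    Nat → List (Int × Int) × PySem.Set (Int × Int) × Int × Int → Int × PySem.Set (Int × Int)
  | 0, st => (st.2.2.1 * st.2.2.2, st.2.1)
  | fuel + 1, st =>
    match st.1 with
    | [] => (st.2.2.1 * st.2.2.2, st.2.1)
    | (x, y) :: rest =>
      visitLoop G char n m fuel
        ([0, 1, 2, 3].foldl (visitInner G char n m x y) (rest, st.2.1, st.2.2.1, st.2.2.2))

def visit (G : List (List String)) (s : Int × Int) (visited : PySem.Set (Int × Int)) :
    Int × PySem.Set (Int × Int) :=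
  let char := pvGet G s.1 s.2
  let n : Int := G.length
  let m : Int := (G.headD []).length
  let vis := PySem.Set.add visited s
  visitLoop G char n m (2 * n.toNat * m.toNat + 1) ([s], vis, 0, 1)

-- body of count_areas's inner `for c in range(len(G[0]))` loop
def cellStepA (G : List (List String)) (r : Int) (st : Int × PySem.Set (Int × Int)) (c : Int) :
    Int × PySem.Set (Int × Int) :=
  if !(PySem.Set.contains st.2 (r, c)) then
    let cv := visit G (r, c) st.2
    (st.1 + cv.1, cv.2)
  else st

def rowStepA (G : List (List String)) (st : Int × PySem.Set (Int × Int)) (r : Int) :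
    Int × PySem.Set (Int × Int) :=
  (PySem.List.pyRange 0 ((G.headD []).length : Int) 1).foldl (cellStepA G r) st

def count_areas (G : List (List String)) : Int :=
  ((PySem.List.pyRange 0 (G.length : Int) 1).foldl (rowStepA G)
    ((0 : Int), (PySem.Set.empty : PySem.Set (Int × Int)))).1

-- ===== PORT B =====
-- the tuple ((r-1,c),(r+1,c),(r,c-1),(r,c+1)) of Source B's sweep
def nbr4 (r c : Int) : List (Int × Int) := [(r - 1, c), (r + 1, c), (r, c - 1), (r, c + 1)]

-- Source B's local helper diff(x, y) inside _corners
def diffB (G : List (List String)) (n m r c x y : Int) : Bool :=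
  !(pvInb x y n m) || (pvGet G x y != pvGet G r c)

-- the tuple of direction pairs of _corners
def cornerPairs : List ((Int × Int) × (Int × Int)) :=
  [((-1, 0), (0, 1)), ((0, 1), (1, 0)), ((1, 0), (0, -1)), ((0, -1), (-1, 0))]

-- _corners(G, r, c, n, m)
def cornersB (G : List (List String)) (r c n m : Int) : Int :=
  cornerPairs.foldl (fun cnt pq =>
    let a := diffB G n m r c (r + pq.1.1) (c + pq.1.2)
    let b := diffB G n m r c (r + pq.2.1) (c + pq.2.2)
    if a && b then cnt + 1
    else if !a && !b && diffB G n m r c (r + pq.1.1 + pq.2.1) (c + pq.1.2 + pq.2.2) then cnt + 1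
    else cnt) 0

-- label initialisation: label[(r, c)] = r * m + c
def initLabels (n m : Int) : PySem.Dict (Int × Int) Int :=
  (PySem.List.pyRange 0 n 1).foldl (fun lbl r =>
    (PySem.List.pyRange 0 m 1).foldl (fun lbl c => lbl.insert (r, c) (r * m + c)) lbl)
    PySem.Dict.empty

-- the body of the sweep's innermost `for rr, cc in (...)` loop (state: label dict × changed flag)
def sweepNbr (G : List (List String)) (n m r c : Int)
    (st : PySem.Dict (Int × Int) Int × Bool) (q : Int × Int) :
    PySem.Dict (Int × Int) Int × Bool :=
  if pvInb q.1 q.2 n m && (pvGet G q.1 q.2 == pvGet G r c)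
      && decide (st.1.getD q 0 < st.1.getD (r, c) 0) then
    (st.1.insert (r, c) (st.1.getD q 0), true)
  else st

-- one full sweep over the grid, starting with changed = False
def sweepOnce (G : List (List String)) (n m : Int) (lbl : PySem.Dict (Int × Int) Int) :
    PySem.Dict (Int × Int) Int × Bool :=
  (PySem.List.pyRange 0 n 1).foldl (fun st r =>
    (PySem.List.pyRange 0 m 1).foldl (fun st c => (nbr4 r c).foldl (sweepNbr G n m r c) st) st)
    (lbl, false)

-- one iteration of `for _ in range(n*m*n*m)`; the Bool is the `break` having happened
def sweepIter (G : List (List String)) (n m : Int)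
    (st : PySem.Dict (Int × Int) Int × Bool) (_ : Int) : PySem.Dict (Int × Int) Int × Bool :=
  if st.2 then st
  else
    let r := sweepOnce G n m st.1
    (r.1, !r.2)

def runSweeps (G : List (List String)) (n m : Int) : PySem.Dict (Int × Int) Int :=
  ((PySem.List.pyRange 0 (n * m * n * m) 1).foldl (sweepIter G n m) (initLabels n m, false)).1

-- the size-counting pass
def sizeDict (n m : Int) (lbl : PySem.Dict (Int × Int) Int) : PySem.Dict Int Int :=
  (PySem.List.pyRange 0 n 1).foldl (fun sz r =>
    (PySem.List.pyRange 0 m 1).foldl (fun sz c =>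
      sz.insert (lbl.getD (r, c) 0) (sz.getD (lbl.getD (r, c) 0) 0 + 1)) sz)
    PySem.Dict.empty

def count_areas_alt (G : List (List String)) : Int :=
  let n : Int := G.length
  let m : Int := if G ≠ [] then ((G.headD []).length : Int) else 0
  let lbl := runSweeps G n m
  let sz := sizeDict n m lbl
  (PySem.List.pyRange 0 n 1).foldl (fun tot r =>
    (PySem.List.pyRange 0 m 1).foldl (fun tot c =>
      tot + cornersB G r c n m * sz.getD (lbl.getD (r, c) 0) 0) tot) 0

-- ===== PRECONDITION & SPEC =====
-- Pre_ excludes exactly the inputs on which Python A raises IndexError: grids having a row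
-- shorter than row 0 (a missing cell of such a row gets read). The empty grid is inside Pre_.
def Pre_count_areas (G : List (List String)) : Prop :=
  ∀ row ∈ G, (G.headD []).length ≤ row.length
instance (G : List (List String)) : Decidable (Pre_count_areas G) := by
  unfold Pre_count_areas; infer_instance

def pvWitness_count_areas : List (List String) := [["a", "a", "b"], ["b", "a", "b"]]

def Spec_count_areas (G : List (List String)) (out : Int) : Prop := out = count_areas_alt G
instance (G : List (List String)) (out : Int) : Decidable (Spec_count_areas G out) := by
  unfold Spec_count_areas; infer_instance

-- ===== CLAIM (what is proved, stated in full; the proofs are below) =====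
def Claim_equal_count_areas : Prop :=
  ∀ (G : List (List String)), Dom_count_areas G → Pre_count_areas G →
    Spec_count_areas G (count_areas G)

-- ===== LEMMAS AND PROOFS =====

def gridF (n m : Int) : Finset (Int × Int) :=
  ((PySem.List.pyRange 0 n 1) ×ˢ (PySem.List.pyRange 0 m 1)).toFinset


-- a cell that belongs to the region being traversed: in bounds and carrying the region's char
def okCell (G : List (List String)) (char : String) (n m : Int) (c : Int × Int) : Prop :=
  pvInb c.1 c.2 n m = true ∧ pvGet G c.1 c.2 = char

-- the i-th neighbour probed from (x, y)
def nbrA (x y : Int) (i : Nat) : Int × Int :=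
  (x + (pvDirs.getD i (0, 0)).1, y + (pvDirs.getD i (0, 0)).2)

-- the corner contribution counted for direction index i at cell (x, y)
def contribA (G : List (List String)) (char : String) (n m x y : Int) (i : Nat) : Int :=
  let d1 := pvDirs.getD i (0, 0)
  let d2 := pvDirs.getD ((i + 1) % 4) (0, 0)
  let o1 := is_convex (x + d1.1) (y + d1.2) n m G char
  let o2 := is_convex (x + d2.1) (y + d2.2) n m G char
  if o1 && o2 then (1 : Int)
  else if !o1 && !o2 && is_convex (x + d1.1 + d2.1) (y + d1.2 + d2.2) n m G char then (1 : Int)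
  else 0

lemma pvSame_eq_not_convex (x y n m : Int) (G : List (List String)) (char : String) :
    pvSame x y n m G char = !(is_convex x y n m G char) := by
  cases ha : pvInb x y n m <;> cases hb : pvGet G x y == char <;>
    simp [pvSame, is_convex, ha, hb, bne]

-- the same value, in the shape of the two terms A's inner loop adds to `ans`
lemma contribA_eq_terms (G : List (List String)) (char : String) (n m x y : Int) (i : Nat) :
    contribA G char n m x y i =
      (if is_convex (x + (pvDirs.getD i (0, 0)).1) (y + (pvDirs.getD i (0, 0)).2) n m G char
          && is_convex (x + (pvDirs.getD ((i + 1) % 4) (0, 0)).1)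
               (y + (pvDirs.getD ((i + 1) % 4) (0, 0)).2) n m G char then (1 : Int) else 0) +
      (if is_convex
            (x + (pvDirs.getD i (0, 0)).1 + (x + (pvDirs.getD ((i + 1) % 4) (0, 0)).1) - x)
            (y + (pvDirs.getD i (0, 0)).2 + (y + (pvDirs.getD ((i + 1) % 4) (0, 0)).2) - y)
            n m G char
          && pvSame (x + (pvDirs.getD i (0, 0)).1) (y + (pvDirs.getD i (0, 0)).2) n m G char
          && pvSame (x + (pvDirs.getD ((i + 1) % 4) (0, 0)).1)
               (y + (pvDirs.getD ((i + 1) % 4) (0, 0)).2) n m G char then (1 : Int) else 0) := by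
  have e1 : x + (pvDirs.getD i (0, 0)).1 + (x + (pvDirs.getD ((i + 1) % 4) (0, 0)).1) - x
      = x + (pvDirs.getD i (0, 0)).1 + (pvDirs.getD ((i + 1) % 4) (0, 0)).1 := by ring
  have e2 : y + (pvDirs.getD i (0, 0)).2 + (y + (pvDirs.getD ((i + 1) % 4) (0, 0)).2) - y
      = y + (pvDirs.getD i (0, 0)).2 + (pvDirs.getD ((i + 1) % 4) (0, 0)).2 := by ring
  rw [e1, e2, pvSame_eq_not_convex, pvSame_eq_not_convex, contribA]
  cases is_convex (x + (pvDirs.getD i (0, 0)).1) (y + (pvDirs.getD i (0, 0)).2) n m G char <;>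
    cases is_convex (x + (pvDirs.getD ((i + 1) % 4) (0, 0)).1)
      (y + (pvDirs.getD ((i + 1) % 4) (0, 0)).2) n m G char <;>
    cases is_convex (x + (pvDirs.getD i (0, 0)).1 + (pvDirs.getD ((i + 1) % 4) (0, 0)).1)
      (y + (pvDirs.getD i (0, 0)).2 + (pvDirs.getD ((i + 1) % 4) (0, 0)).2) n m G char <;>
    simp

def cornersA (G : List (List String)) (char : String) (n m x y : Int) : Int :=
  (([0, 1, 2, 3] : List Nat).map (contribA G char n m x y)).sum

lemma mem_gridF (n m : Int) (c : Int × Int) : c ∈ gridF n m ↔ pvInb c.1 c.2 n m = true := by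
  cases c with
  | mk a b =>
    simp [gridF, pvInb, PySem.List.mem_pyRange_one]
    omega

lemma gridF_card (n m : Int) : (gridF n m).card = n.toNat * m.toNat := by
  have hnd : ((PySem.List.pyRange 0 n 1) ×ˢ (PySem.List.pyRange 0 m 1)).Nodup :=
    List.Nodup.product (PySem.List.nodup_pyRange_one 0 n) (PySem.List.nodup_pyRange_one 0 m)
  rw [gridF, List.toFinset_card_of_nodup hnd, List.length_product,
    PySem.List.length_pyRange_one, PySem.List.length_pyRange_one]
  norm_num

def ucountD (n m : Int) (vis : List (Int × Int)) : Nat := ((gridF n m) \ vis.toFinset).card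

lemma ucount_drop (n m : Int) (vis new : List (Int × Int)) (hnd : new.Nodup)
    (h : ∀ p ∈ new, pvInb p.1 p.2 n m = true ∧ p ∉ vis) :
    ucountD n m (vis ++ new) + new.length ≤ ucountD n m vis := by
  classical
  have hBcard : new.toFinset.card = new.length := List.toFinset_card_of_nodup hnd
  have hdisj : Disjoint (gridF n m \ (vis ++ new).toFinset) new.toFinset := by
    rw [Finset.disjoint_left]
    intro a ha hb
    rw [Finset.mem_sdiff, List.mem_toFinset, List.mem_append] at ha
    exact ha.2 (Or.inr (List.mem_toFinset.mp hb))
  have hsub : (gridF n m \ (vis ++ new).toFinset) ∪ new.toFinset ⊆ gridF n m \ vis.toFinset := by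
    intro a ha
    rw [Finset.mem_union] at ha
    rw [Finset.mem_sdiff, List.mem_toFinset]
    rcases ha with hc | hc
    · rw [Finset.mem_sdiff, List.mem_toFinset, List.mem_append] at hc
      exact ⟨hc.1, fun hv => hc.2 (Or.inl hv)⟩
    · have hm := List.mem_toFinset.mp hc
      exact ⟨(mem_gridF n m a).mpr (h a hm).1, (h a hm).2⟩
  calc ucountD n m (vis ++ new) + new.length
      = ((gridF n m \ (vis ++ new).toFinset) ∪ new.toFinset).card := by
        rw [Finset.card_union_of_disjoint hdisj, hBcard]; rfl
    _ ≤ ucountD n m vis := Finset.card_le_card hsub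

lemma ucount_le (n m : Int) (vis : List (Int × Int)) : ucountD n m vis ≤ n.toNat * m.toNat := by
  rw [← gridF_card n m]
  exact Finset.card_le_card (Finset.sdiff_subset)

-- A's per-direction step, flattened
lemma visitInner_shape (G : List (List String)) (char : String) (n m x y : Int)
    (q : List (Int × Int)) (vis : PySem.Set (Int × Int)) (ans area : Int) (i : Nat) :
    visitInner G char n m x y (q, vis, ans, area) i =
      if pvInb (nbrA x y i).1 (nbrA x y i).2 n m
          && !(PySem.Set.contains vis (nbrA x y i))
          && (pvGet G (nbrA x y i).1 (nbrA x y i).2 == char) then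
        (q ++ [nbrA x y i], PySem.Set.add vis (nbrA x y i),
          ans + contribA G char n m x y i, area + 1)
      else (q, vis, ans + contribA G char n m x y i, area) := by
  simp only [visitInner, nbrA]
  rw [contribA_eq_terms]
  generalize pvDirs.getD i (0, 0) = d
  generalize pvDirs.getD ((i + 1) % 4) (0, 0) = d2
  by_cases ha : pvInb (x + d.1) (y + d.2) n m = true <;>
    by_cases hb : (x + d.1, y + d.2) ∈ vis <;>
    by_cases hc : pvGet G (x + d.1) (y + d.2) = char <;>
    simp [ha, hb, hc, add_assoc]

-- the inner 4-direction fold of A's visit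
lemma foldA_spec (G : List (List String)) (char : String) (n m x y : Int) :
    ∀ (I : List Nat) (q vis : List (Int × Int)) (ans area : Int),
    ∃ new : List (Int × Int),
      I.foldl (visitInner G char n m x y) (q, vis, ans, area)
        = (q ++ new, vis ++ new, ans + (I.map (contribA G char n m x y)).sum,
            area + new.length)
      ∧ new.Nodup
      ∧ (∀ p ∈ new, (∃ i ∈ I, p = nbrA x y i) ∧ okCell G char n m p ∧ p ∉ vis)
      ∧ (∀ i ∈ I, okCell G char n m (nbrA x y i) → nbrA x y i ∈ vis ++ new) := by
  intro I
  induction I with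
  | nil =>
    intro q vis ans area
    exact ⟨[], by simp, by simp, by simp, by simp⟩
  | cons i I ih =>
    intro q vis ans area
    rw [List.foldl_cons, visitInner_shape]
    by_cases hc : (pvInb (nbrA x y i).1 (nbrA x y i).2 n m
        && !(PySem.Set.contains vis (nbrA x y i))
        && (pvGet G (nbrA x y i).1 (nbrA x y i).2 == char)) = true
    · rw [if_pos hc]
      have hc' := hc
      rw [Bool.and_eq_true, Bool.and_eq_true] at hc'
      obtain ⟨⟨hinb, hncont⟩, hbeq⟩ := hc'
      have hnm : nbrA x y i ∉ vis := by
        intro hmem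
        rw [Bool.not_eq_true'] at hncont
        exact (ne_true_of_eq_false hncont) ((PySem.Set.contains_iff _ _).mpr hmem)
      have hok : okCell G char n m (nbrA x y i) := ⟨hinb, eq_of_beq hbeq⟩
      rw [PySem.Set.add_of_not_mem hnm]
      obtain ⟨new', heq, hnd, hprops, hclose⟩ :=
        ih (q ++ [nbrA x y i]) (vis ++ [nbrA x y i]) (ans + contribA G char n m x y i) (area + 1)
      refine ⟨nbrA x y i :: new', ?_, ?_, ?_, ?_⟩
      · rw [heq, List.map_cons, List.sum_cons]
        refine Prod.ext ?_ (Prod.ext ?_ (Prod.ext ?_ ?_)) <;> simp <;> ring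
      · refine List.nodup_cons.mpr ⟨?_, hnd⟩
        intro hmem
        have := (hprops _ hmem).2.2
        simp at this
      · intro p hp
        rcases List.mem_cons.mp hp with rfl | hp'
        · exact ⟨⟨i, by simp, rfl⟩, hok, hnm⟩
        · obtain ⟨⟨j, hj, hpj⟩, hokp, hnv⟩ := hprops p hp'
          refine ⟨⟨j, List.mem_cons_of_mem _ hj, hpj⟩, hokp, ?_⟩
          intro hmem
          exact hnv (by simp [hmem])
      · intro j hj hokj
        rcases List.mem_cons.mp hj with rfl | hj'
        · simp
        · have := hclose j hj' hokj
          simp only [List.append_assoc, List.singleton_append] at this ⊢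
          exact this
    · rw [if_neg (by simpa using hc)]
      obtain ⟨new', heq, hnd, hprops, hclose⟩ := ih q vis (ans + contribA G char n m x y i) area
      refine ⟨new', ?_, hnd, ?_, ?_⟩
      · rw [heq, List.map_cons, List.sum_cons]
        refine Prod.ext ?_ (Prod.ext ?_ (Prod.ext ?_ ?_)) <;> simp
        ring
      · intro p hp
        obtain ⟨⟨j, hj, hpj⟩, hokp, hnv⟩ := hprops p hp
        exact ⟨⟨j, List.mem_cons_of_mem _ hj, hpj⟩, hokp, hnv⟩
      · intro j hj hokj
        rcases List.mem_cons.mp hj with rfl | hj'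
        · -- the condition failed but the cell is ok: it must already be visited
          rw [Bool.and_eq_true, Bool.and_eq_true] at hc
          obtain ⟨hokinb, hokval⟩ := hokj
          have hcont : PySem.Set.contains vis (nbrA x y j) = true := by
            by_contra hfalse
            exact hc ⟨⟨hokinb, by simpa using hfalse⟩, beq_iff_eq.mpr hokval⟩
          have : nbrA x y j ∈ vis := (PySem.Set.contains_iff _ _).mp hcont
          exact List.mem_append_left _ this
        · exact hclose j hj' hokj

lemma visitLoop_nil (G : List (List String)) (char : String) (n m : Int) (fuel : Nat)
    (vis : PySem.Set (Int × Int)) (ans area : Int) :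
    visitLoop G char n m fuel ([], vis, ans, area) = (ans * area, vis) := by
  cases fuel <;> rfl

-- master lemma for A's BFS loop
lemma visitLoopA_spec (G : List (List String)) (char : String) (n m : Int) :
    ∀ (fuel : Nat) (q vis : List (Int × Int)) (ans area : Int),
    q.Nodup → (∀ c ∈ q, c ∈ vis) → (∀ c ∈ q, okCell G char n m c) →
    q.length + 2 * ucountD n m vis ≤ fuel →
    ∃ Δ : List (Int × Int),
      visitLoop G char n m fuel (q, vis, ans, area)
        = ((ans + ((q ++ Δ).map (fun c => cornersA G char n m c.1 c.2)).sum)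
             * (area + Δ.length), vis ++ Δ)
      ∧ Δ.Nodup
      ∧ (∀ c ∈ Δ, okCell G char n m c ∧ c ∉ vis)
      ∧ (∀ W : Finset (Int × Int), (∀ c ∈ q, c ∈ W) →
          (∀ x ∈ W, ∀ i ∈ ([0, 1, 2, 3] : List Nat), okCell G char n m (nbrA x.1 x.2 i) →
            nbrA x.1 x.2 i ∉ vis → nbrA x.1 x.2 i ∈ W) → ∀ c ∈ Δ, c ∈ W)
      ∧ (∀ x ∈ q ++ Δ, ∀ i ∈ ([0, 1, 2, 3] : List Nat), okCell G char n m (nbrA x.1 x.2 i) →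
          nbrA x.1 x.2 i ∈ vis ++ Δ) := by
  intro fuel
  induction fuel with
  | zero =>
    intro q vis ans area hnd hqv hok hfuel
    have hq : q = [] := by
      cases q with
      | nil => rfl
      | cons a l => simp at hfuel
    subst hq
    exact ⟨[], by simp [visitLoop_nil], by simp, by simp, by simp, by simp⟩
  | succ fuel ih =>
    intro q vis ans area hnd hqv hok hfuel
    cases q with
    | nil => exact ⟨[], by simp [visitLoop_nil], by simp, by simp, by simp, by simp⟩
    | cons hd rest =>
      obtain ⟨xx, yy⟩ := hd
      have hloop : visitLoop G char n m (fuel + 1) ((xx, yy) :: rest, vis, ans, area)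
          = visitLoop G char n m fuel
              ([0, 1, 2, 3].foldl (visitInner G char n m xx yy) (rest, vis, ans, area)) := rfl
      obtain ⟨new, heqf, hndn, hpropsn, hclosen⟩ :=
        foldA_spec G char n m xx yy [0, 1, 2, 3] rest vis ans area
      have hsum : (([0, 1, 2, 3] : List Nat).map (contribA G char n m xx yy)).sum
          = cornersA G char n m xx yy := rfl
      rw [hsum] at heqf
      have hrest_nd : rest.Nodup := (List.nodup_cons.mp hnd).2
      have hrest_vis : ∀ c ∈ rest, c ∈ vis := fun c hc => hqv c (List.mem_cons_of_mem _ hc)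
      have hdisj : ∀ c ∈ new, c ∉ rest := by
        intro c hc hcr
        exact (hpropsn c hc).2.2 (hrest_vis c hcr)
      have hnd' : (rest ++ new).Nodup := by
        rw [List.nodup_append]
        refine ⟨hrest_nd, hndn, ?_⟩
        intro c hcr b hbn
        exact fun he => hdisj b hbn (he ▸ hcr)
      have hqv' : ∀ c ∈ rest ++ new, c ∈ vis ++ new := by
        intro c hc
        rcases List.mem_append.mp hc with h | h
        · exact List.mem_append_left _ (hrest_vis c h)
        · exact List.mem_append_right _ h
      have hok' : ∀ c ∈ rest ++ new, okCell G char n m c := by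
        intro c hc
        rcases List.mem_append.mp hc with h | h
        · exact hok c (List.mem_cons_of_mem _ h)
        · exact (hpropsn c h).2.1
      have hdrop : ucountD n m (vis ++ new) + new.length ≤ ucountD n m vis :=
        ucount_drop n m vis new hndn
          (fun p hp => ⟨(hpropsn p hp).2.1.1, (hpropsn p hp).2.2⟩)
      have hfuel' : (rest ++ new).length + 2 * ucountD n m (vis ++ new) ≤ fuel := by
        rw [List.length_append]
        simp only [List.length_cons] at hfuel
        omega
      obtain ⟨Δ', heq', hndΔ, hpropsΔ, hminΔ, hcloseΔ⟩ :=
        ih (rest ++ new) (vis ++ new) (ans + cornersA G char n m xx yy)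
          (area + new.length) hnd' hqv' hok' hfuel'
      refine ⟨new ++ Δ', ?_, ?_, ?_, ?_, ?_⟩
      · rw [hloop, heqf, heq']
        refine Prod.ext ?_ ?_ <;> simp
        ring
      · rw [List.nodup_append]
        refine ⟨hndn, hndΔ, ?_⟩
        intro c hcn b hbΔ
        exact fun he => (hpropsΔ b hbΔ).2 (List.mem_append_right _ (he ▸ hcn))
      · intro c hc
        rcases List.mem_append.mp hc with h | h
        · exact ⟨(hpropsn c h).2.1, (hpropsn c h).2.2⟩
        · refine ⟨(hpropsΔ c h).1, ?_⟩
          intro hcv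
          exact (hpropsΔ c h).2 (List.mem_append_left _ hcv)
      · intro W hqW hWcl
        have hheadW : (xx, yy) ∈ W := hqW _ List.mem_cons_self
        have hnewW : ∀ c ∈ new, c ∈ W := by
          intro c hc
          obtain ⟨⟨i, hi, rfl⟩, hokc, hnv⟩ := hpropsn c hc
          exact hWcl (xx, yy) hheadW i hi hokc hnv
        intro c hc
        rcases List.mem_append.mp hc with h | h
        · exact hnewW c h
        · refine hminΔ W ?_ ?_ c h
          · intro c' hc'
            rcases List.mem_append.mp hc' with h' | h'
            · exact hqW _ (List.mem_cons_of_mem _ h')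
            · exact hnewW c' h'
          · intro x hx i hi hokn hnv
            exact hWcl x hx i hi hokn (fun hmem => hnv (List.mem_append_left _ hmem))
      · intro x hx i hi hokn
        rcases List.mem_cons.mp hx with rfl | hx'
        · have := hclosen i hi hokn
          rcases List.mem_append.mp this with h | h
          · exact List.mem_append_left _ h
          · exact List.mem_append_right _ (List.mem_append_left _ h)
        · have hx'' : x ∈ (rest ++ new) ++ Δ' := by
            rcases List.mem_append.mp hx' with h | h
            · exact List.mem_append_left _ (List.mem_append_left _ h)
            · rcases List.mem_append.mp h with h' | h'
              · exact List.mem_append_left _ (List.mem_append_right _ h')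
              · exact List.mem_append_right _ h'
          have := hcloseΔ x hx'' i hi hokn
          rcases List.mem_append.mp this with h | h
          · rcases List.mem_append.mp h with h' | h'
            · exact List.mem_append_left _ h'
            · exact List.mem_append_right _ (List.mem_append_left _ h')
          · exact List.mem_append_right _ (List.mem_append_right _ h)

-- ---------- component machinery (proof-side) ----------

-- the index a cell starts with in B: idx (r, c) = r * m + c
def idxL (m : Int) (p : Int × Int) : Int := p.1 * m + p.2

-- grid adjacency between equal-character in-bounds cells
def adjOk (G : List (List String)) (n m : Int) (p q : Int × Int) : Prop :=
  pvInb p.1 p.2 n m = true ∧ pvInb q.1 q.2 n m = true ∧ q ∈ nbr4 p.1 p.2 ∧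
    pvGet G q.1 q.2 = pvGet G p.1 p.2

def Reach (G : List (List String)) (n m : Int) : Int × Int → Int × Int → Prop :=
  Relation.ReflTransGen (adjOk G n m)

-- the connected component of p
noncomputable def comp (G : List (List String)) (n m : Int) (p : Int × Int) :
    Finset (Int × Int) :=
  @Finset.filter _ (fun q => Reach G n m p q) (fun q => Classical.propDecidable _) (gridF n m)

-- min of idx over a finite set of cells
def minIdx (m : Int) (S : Finset (Int × Int)) : Int :=
  if h : S.Nonempty then (S.image (idxL m)).min' (h.image _) else 0

-- per-cell summand: corner contribution of the cell times the size of its component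
noncomputable def fval (G : List (List String)) (n m : Int) (p : Int × Int) : Int :=
  cornersA G (pvGet G p.1 p.2) n m p.1 p.2 * ((comp G n m p).card : Int)

lemma nbr4_symm (p q : Int × Int) (h : q ∈ nbr4 p.1 p.2) : p ∈ nbr4 q.1 q.2 := by
  simp [nbr4, Prod.ext_iff] at h ⊢
  omega

lemma mem_nbr4_iff (x y : Int) (q : Int × Int) :
    q ∈ nbr4 x y ↔ ∃ i ∈ ([0, 1, 2, 3] : List Nat), q = nbrA x y i := by
  have h0 : nbrA x y 0 = (x + 1, y) := by simp [nbrA, pvDirs]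
  have h1 : nbrA x y 1 = (x, y + 1) := by simp [nbrA, pvDirs]
  have h2 : nbrA x y 2 = (x - 1, y) := by simp [nbrA, pvDirs]; ring
  have h3 : nbrA x y 3 = (x, y - 1) := by simp [nbrA, pvDirs]; ring
  constructor
  · intro h
    rcases (by simpa [nbr4] using h : q = (x - 1, y) ∨ q = (x + 1, y) ∨ q = (x, y - 1) ∨
        q = (x, y + 1)) with h | h | h | h
    · exact ⟨2, by norm_num, by rw [h, h2]⟩
    · exact ⟨0, by norm_num, by rw [h, h0]⟩
    · exact ⟨3, by norm_num, by rw [h, h3]⟩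
    · exact ⟨1, by norm_num, by rw [h, h1]⟩
  · rintro ⟨i, hi, rfl⟩
    fin_cases hi <;> simp [nbr4, h0, h1, h2, h3]

lemma adjOk_symm (G : List (List String)) (n m : Int) : Symmetric (adjOk G n m) := by
  rintro p q ⟨hp, hq, hn, hc⟩
  exact ⟨hq, hp, nbr4_symm p q hn, hc.symm⟩

lemma reach_symm (G : List (List String)) (n m : Int) {p q : Int × Int}
    (h : Reach G n m p q) : Reach G n m q p :=
  Relation.ReflTransGen.symmetric (adjOk_symm G n m) h

lemma reach_char (G : List (List String)) (n m : Int) {p q : Int × Int}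
    (h : Reach G n m p q) : pvGet G q.1 q.2 = pvGet G p.1 p.2 := by
  induction h with
  | refl => rfl
  | tail _ h2 ih => rw [h2.2.2.2, ih]

lemma mem_comp (G : List (List String)) (n m : Int) (p q : Int × Int) :
    q ∈ comp G n m p ↔ q ∈ gridF n m ∧ Reach G n m p q :=
  @Finset.mem_filter _ (fun q => Reach G n m p q) (fun q => Classical.propDecidable _)
    (gridF n m) q

lemma mem_comp_self (G : List (List String)) (n m : Int) (p : Int × Int)
    (hp : p ∈ gridF n m) : p ∈ comp G n m p :=
  (mem_comp G n m p p).mpr ⟨hp, Relation.ReflTransGen.refl⟩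

lemma comp_closed (G : List (List String)) (n m : Int) {p x q : Int × Int}
    (hx : x ∈ comp G n m p) (h : adjOk G n m x q) : q ∈ comp G n m p := by
  rw [mem_comp] at hx ⊢
  exact ⟨(mem_gridF n m q).mpr h.2.1, hx.2.tail h⟩

lemma comp_congr (G : List (List String)) (n m : Int) {p q : Int × Int}
    (hq : q ∈ comp G n m p) : comp G n m q = comp G n m p := by
  rw [mem_comp] at hq
  apply Finset.ext
  intro r
  rw [mem_comp, mem_comp]
  constructor
  · rintro ⟨hr, h⟩
    exact ⟨hr, hq.2.trans h⟩
  · rintro ⟨hr, h⟩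
    exact ⟨hr, (reach_symm G n m hq.2).trans h⟩

lemma comp_subset_grid (G : List (List String)) (n m : Int) (p : Int × Int) :
    comp G n m p ⊆ gridF n m := fun q hq => ((mem_comp G n m p q).mp hq).1

lemma char_of_mem_comp (G : List (List String)) (n m : Int) {p q : Int × Int}
    (hq : q ∈ comp G n m p) : pvGet G q.1 q.2 = pvGet G p.1 p.2 :=
  reach_char G n m ((mem_comp G n m p q).mp hq).2

lemma minIdx_le (m : Int) (S : Finset (Int × Int)) {p : Int × Int} (hp : p ∈ S) :
    minIdx m S ≤ idxL m p := by
  rw [minIdx, dif_pos ⟨p, hp⟩]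
  exact Finset.min'_le _ _ (Finset.mem_image_of_mem _ hp)

lemma minIdx_mem (m : Int) (S : Finset (Int × Int)) (h : S.Nonempty) :
    ∃ w ∈ S, idxL m w = minIdx m S := by
  rw [minIdx, dif_pos h]
  have := Finset.min'_mem (S.image (idxL m)) (h.image _)
  rw [Finset.mem_image] at this
  exact this

lemma idx_inj (n m : Int) {p q : Int × Int} (hp : p ∈ gridF n m) (hq : q ∈ gridF n m)
    (h : idxL m p = idxL m q) : p = q := by
  rw [mem_gridF] at hp hq
  simp only [pvInb, decide_eq_true_eq] at hp hq
  simp only [idxL] at h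
  have h1 : p.1 = q.1 := by nlinarith [hp.1, hp.2.1, hp.2.2.1, hp.2.2.2, hq.1, hq.2.1,
    hq.2.2.1, hq.2.2.2]
  have h2 : p.2 = q.2 := by nlinarith
  exact Prod.ext h1 h2

-- saturation: a visited set closed under equal-character adjacency
def Sat (G : List (List String)) (n m : Int) (vis : List (Int × Int)) : Prop :=
  ∀ x y, x ∈ vis → adjOk G n m x y → y ∈ vis

lemma sat_reach (G : List (List String)) (n m : Int) {vis : List (Int × Int)}
    (hs : Sat G n m vis) {x y : Int × Int} (hx : x ∈ vis) (h : Reach G n m x y) : y ∈ vis := by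
  induction h with
  | refl => exact hx
  | tail _ h2 ih => exact hs _ _ ih h2

lemma comp_disj_vis (G : List (List String)) (n m : Int) {vis : List (Int × Int)}
    {s : Int × Int} (hsat : Sat G n m vis) (hnv : s ∉ vis) :
    ∀ x ∈ comp G n m s, x ∉ vis := by
  intro x hx hxv
  exact hnv (sat_reach G n m hsat hxv (reach_symm G n m ((mem_comp G n m s x).mp hx).2))

-- the grid as a list, in scan order
def cellsL (n m : Int) : List (Int × Int) :=
  (PySem.List.pyRange 0 n 1) ×ˢ (PySem.List.pyRange 0 m 1)

lemma nodup_cellsL (n m : Int) : (cellsL n m).Nodup :=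
  List.Nodup.product (PySem.List.nodup_pyRange_one 0 n) (PySem.List.nodup_pyRange_one 0 m)

lemma toFinset_cellsL (n m : Int) : (cellsL n m).toFinset = gridF n m := rfl

lemma mem_cellsL (n m : Int) (p : Int × Int) : p ∈ cellsL n m ↔ pvInb p.1 p.2 n m = true := by
  rw [← mem_gridF, ← toFinset_cellsL, List.mem_toFinset]

-- a nested row/column loop is the loop over the cell list
lemma foldl_prod_bridge {σ : Type} (rs cs : List Int) (g : σ → Int × Int → σ) (s₀ : σ) :
    rs.foldl (fun s r => cs.foldl (fun s c => g s (r, c)) s) s₀ = (rs ×ˢ cs).foldl g s₀ := by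
  induction rs generalizing s₀ with
  | nil => rfl
  | cons r rs ih =>
    show (rs.foldl _ (cs.foldl (fun s c => g s (r, c)) s₀)) = _
    rw [ih]
    have : (r :: rs) ×ˢ cs = cs.map (fun c => (r, c)) ++ rs ×ˢ cs := by
      simp [SProd.sprod, List.product]
    rw [this, List.foldl_append, List.foldl_map]

-- ---------- A's visit explores exactly one component ----------

lemma visit_comp (G : List (List String)) (s : Int × Int) (vis : PySem.Set (Int × Int))
    (hs : s ∈ gridF (G.length : Int) ((G.headD []).length : Int))
    (hsat : Sat G (G.length : Int) ((G.headD []).length : Int) vis)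
    (hnv : s ∉ (vis : List (Int × Int))) :
    (visit G s vis).1
        = ∑ p ∈ comp G (G.length : Int) ((G.headD []).length : Int) s,
            fval G (G.length : Int) ((G.headD []).length : Int) p
    ∧ ((visit G s vis).2 : List (Int × Int)).toFinset
        = vis.toFinset ∪ comp G (G.length : Int) ((G.headD []).length : Int) s
    ∧ Sat G (G.length : Int) ((G.headD []).length : Int)
        ((visit G s vis).2 : List (Int × Int)) := by
  set n : Int := (G.length : Int) with hn
  set m : Int := ((G.headD []).length : Int) with hm
  set char : String := pvGet G s.1 s.2 with hchar
  have hinb : pvInb s.1 s.2 n m = true := (mem_gridF n m s).mp hs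
  have hfuel : ([s] : List (Int × Int)).length
      + 2 * ucountD n m ((vis : List (Int × Int)) ++ [s]) ≤ 2 * n.toNat * m.toNat + 1 := by
    have := ucount_le n m ((vis : List (Int × Int)) ++ [s])
    have h2 : 2 * n.toNat * m.toNat = 2 * (n.toNat * m.toNat) := by ring
    simp only [List.length_singleton]
    omega
  obtain ⟨Δ, heqA, hndA, hpropsA, hminA, hcloseA⟩ :=
    visitLoopA_spec G char n m (2 * n.toNat * m.toNat + 1) [s] (vis ++ [s]) 0 1
      (List.nodup_singleton s) (by simp)
      (by intro c hc; rw [List.mem_singleton.mp hc]; exact ⟨hinb, rfl⟩) hfuel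
  have hvisit : visit G s vis
      = visitLoop G char n m (2 * n.toNat * m.toNat + 1) ([s], vis ++ [s], 0, 1) := by
    rw [visit, PySem.Set.add_of_not_mem hnv]
  -- Δ sits inside the component of s
  have hTsub : ∀ c ∈ Δ, c ∈ comp G n m s := by
    refine hminA (comp G n m s) (by simpa using mem_comp_self G n m s hs) ?_
    intro x hx i hi hok _
    refine comp_closed G n m hx ⟨(mem_gridF n m x).mp (comp_subset_grid G n m s hx), hok.1,
      (mem_nbr4_iff x.1 x.2 _).mpr ⟨i, hi, rfl⟩, ?_⟩
    rw [hok.2, char_of_mem_comp G n m hx]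
  -- the component of s sits inside [s] ++ Δ
  have hsupset : ∀ q ∈ comp G n m s, q ∈ ([s] ++ Δ : List (Int × Int)) := by
    intro q hq
    obtain ⟨hqg, hr⟩ := (mem_comp G n m s q).mp hq
    clear hqg hq
    induction hr with
    | refl => simp
    | @tail b c hab hbc ih =>
      have hbcomp : b ∈ comp G n m s :=
        (mem_comp G n m s b).mpr ⟨(mem_gridF n m b).mpr hbc.1, hab⟩
      obtain ⟨i, hi, hceq⟩ := (mem_nbr4_iff b.1 b.2 c).mp hbc.2.2.1
      have hok : okCell G char n m (nbrA b.1 b.2 i) := by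
        rw [← hceq]
        exact ⟨hbc.2.1, by rw [hbc.2.2.2, char_of_mem_comp G n m hbcomp]⟩
      have := hcloseA b ih i hi hok
      rw [← hceq] at this
      rcases List.mem_append.mp this with h | h
      · rcases List.mem_append.mp h with h' | h'
        · exfalso
          exact comp_disj_vis G n m hsat hnv c (comp_closed G n m hbcomp hbc) h'
        · exact List.mem_append_left _ h'
      · exact List.mem_append_right _ h
  have hset : comp G n m s = ([s] ++ Δ : List (Int × Int)).toFinset := by
    apply Finset.ext
    intro q
    rw [List.mem_toFinset]
    constructor
    · exact hsupset q
    · intro hq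
      rcases List.mem_append.mp hq with h | h
      · rw [List.mem_singleton.mp h]
        exact mem_comp_self G n m s hs
      · exact hTsub q h
  have hsΔ : s ∉ Δ := fun h => (hpropsA s h).2 (List.mem_append_right _ (by simp))
  have hnds : (([s] ++ Δ) : List (Int × Int)).Nodup := by
    simpa using List.nodup_cons.mpr ⟨hsΔ, hndA⟩
  have hcard : ((comp G n m s).card : Int) = 1 + (Δ.length : Int) := by
    rw [hset, List.toFinset_card_of_nodup hnds]
    simp
    omega
  have hsum : ((([s] ++ Δ) : List (Int × Int)).map
        (fun c => cornersA G char n m c.1 c.2)).sum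
      = ∑ p ∈ comp G n m s, cornersA G char n m p.1 p.2 := by
    rw [hset, List.sum_toFinset _ hnds]
  have hval : (visit G s vis).1 = ∑ p ∈ comp G n m s, fval G n m p := by
    rw [hvisit, heqA]
    simp only [zero_add]
    rw [hsum]
    have : (1 : Int) + (Δ.length : Int) = ((comp G n m s).card : Int) := hcard.symm
    rw [this, Finset.sum_mul]
    refine Finset.sum_congr rfl ?_
    intro p hp
    rw [fval, comp_congr G n m hp, char_of_mem_comp G n m hp]
  refine ⟨hval, ?_, ?_⟩
  · rw [hvisit, heqA]
    simp only [List.toFinset_append, hset]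
    rw [Finset.union_assoc]
  · rw [hvisit, heqA]
    intro x y hx hadj
    dsimp only at hx ⊢
    rcases List.mem_append.mp hx with h | h
    · rcases List.mem_append.mp h with h' | h'
      · exact List.mem_append_left _ (List.mem_append_left _ (hsat x y h' hadj))
      · -- x = s
        have hxc : x ∈ comp G n m s := by
          rw [List.mem_singleton.mp h']
          exact mem_comp_self G n m s hs
        have hyc := comp_closed G n m hxc hadj
        rcases List.mem_append.mp (hsupset y hyc) with h'' | h''
        · exact List.mem_append_left _ (List.mem_append_right _ h'')
        · exact List.mem_append_right _ h''
    · have hxc : x ∈ comp G n m s := hTsub x h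
      have hyc := comp_closed G n m hxc hadj
      rcases List.mem_append.mp (hsupset y hyc) with h'' | h''
      · exact List.mem_append_left _ (List.mem_append_right _ h'')
      · exact List.mem_append_right _ h''

-- ---------- A's scan accumulates the component-weighted corner sum ----------

lemma scanA (G : List (List String)) :
    ∀ (ps : List (Int × Int)),
      (∀ p ∈ ps, p ∈ gridF (G.length : Int) ((G.headD []).length : Int)) →
    ∀ (st : Int × PySem.Set (Int × Int)),
      Sat G (G.length : Int) ((G.headD []).length : Int) (st.2 : List (Int × Int)) →
      st.1 = ∑ p ∈ ((st.2 : List (Int × Int)).toFinset),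
          fval G (G.length : Int) ((G.headD []).length : Int) p →
      (∀ q ∈ (st.2 : List (Int × Int)), q ∈ gridF (G.length : Int) ((G.headD []).length : Int)) →
    Sat G (G.length : Int) ((G.headD []).length : Int)
        (((ps.foldl (fun st p => cellStepA G p.1 st p.2) st).2 : List (Int × Int)))
    ∧ (ps.foldl (fun st p => cellStepA G p.1 st p.2) st).1
        = ∑ p ∈ (((ps.foldl (fun st p => cellStepA G p.1 st p.2) st).2 :
            List (Int × Int)).toFinset),
          fval G (G.length : Int) ((G.headD []).length : Int) p
    ∧ (∀ q ∈ ps, q ∈ ((ps.foldl (fun st p => cellStepA G p.1 st p.2) st).2 :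
          List (Int × Int)))
    ∧ (∀ q, q ∈ (st.2 : List (Int × Int)) →
        q ∈ ((ps.foldl (fun st p => cellStepA G p.1 st p.2) st).2 : List (Int × Int)))
    ∧ (∀ q ∈ (((ps.foldl (fun st p => cellStepA G p.1 st p.2) st).2 : List (Int × Int))),
        q ∈ gridF (G.length : Int) ((G.headD []).length : Int)) := by
  set n : Int := (G.length : Int)
  set m : Int := ((G.headD []).length : Int)
  intro ps
  induction ps with
  | nil =>
    intro _ st hsat hacc hgrid
    exact ⟨hsat, hacc, by simp, fun q hq => hq, hgrid⟩
  | cons p ps ih =>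
    intro hg st hsat hacc hgrid
    rw [List.foldl_cons]
    have hpe : (p.1, p.2) = p := rfl
    by_cases hcont : PySem.Set.contains st.2 p = true
    · have hstep : cellStepA G p.1 st p.2 = st := by
        rw [cellStepA, hpe, hcont]
        simp
      rw [hstep]
      obtain ⟨h1, h2, h3, h4, h5⟩ :=
        ih (fun q hq => hg q (List.mem_cons_of_mem _ hq)) st hsat hacc hgrid
      refine ⟨h1, h2, ?_, h4, h5⟩
      intro q hq
      rcases List.mem_cons.mp hq with rfl | hq'
      · exact h4 q ((PySem.Set.contains_iff _ _).mp hcont)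
      · exact h3 q hq'
    · have hnv : p ∉ (st.2 : List (Int × Int)) := by
        intro hmem
        exact hcont ((PySem.Set.contains_iff _ _).mpr hmem)
      have hstep : cellStepA G p.1 st p.2 = (st.1 + (visit G p st.2).1, (visit G p st.2).2) := by
        rw [cellStepA, hpe]
        rw [Bool.eq_false_iff.mpr hcont]
        simp
      obtain ⟨hv1, hv2, hv3⟩ := visit_comp G p st.2 (hg p List.mem_cons_self) hsat hnv
      have hdisj : Disjoint ((st.2 : List (Int × Int)).toFinset) (comp G n m p) := by
        rw [Finset.disjoint_right]
        intro a ha hav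
        exact comp_disj_vis G n m hsat hnv a ha (List.mem_toFinset.mp hav)
      have hacc' : st.1 + (visit G p st.2).1
          = ∑ q ∈ (((visit G p st.2).2 : List (Int × Int)).toFinset), fval G n m q := by
        rw [hv2, Finset.sum_union hdisj, hacc, hv1]
      have hgrid' : ∀ q ∈ (((visit G p st.2).2 : List (Int × Int))), q ∈ gridF n m := by
        intro q hq
        have : q ∈ ((visit G p st.2).2 : List (Int × Int)).toFinset := List.mem_toFinset.mpr hq
        rw [hv2] at this
        rcases Finset.mem_union.mp this with h | h
        · exact hgrid q (List.mem_toFinset.mp h)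
        · exact comp_subset_grid G n m p h
      rw [hstep]
      obtain ⟨h1, h2, h3, h4, h5⟩ := ih (fun q hq => hg q (List.mem_cons_of_mem _ hq))
        (st.1 + (visit G p st.2).1, (visit G p st.2).2) hv3 hacc' hgrid'
      refine ⟨h1, h2, ?_, ?_, h5⟩
      · intro q hq
        rcases List.mem_cons.mp hq with rfl | hq'
        · refine h4 q ?_
          have : q ∈ ((visit G q st.2).2 : List (Int × Int)).toFinset := by
            rw [hv2]
            exact Finset.mem_union_right _ (mem_comp_self G n m q (hg q List.mem_cons_self))
          exact List.mem_toFinset.mp this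
        · exact h3 q hq'
      · intro q hq
        refine h4 q ?_
        have : q ∈ ((visit G p st.2).2 : List (Int × Int)).toFinset := by
          rw [hv2]
          exact Finset.mem_union_left _ (List.mem_toFinset.mpr hq)
        exact List.mem_toFinset.mp this

-- A's whole result, as a sum over the grid
lemma countA_eq_sum (G : List (List String)) :
    count_areas G
      = ∑ p ∈ gridF (G.length : Int) ((G.headD []).length : Int),
          fval G (G.length : Int) ((G.headD []).length : Int) p := by
  set n : Int := (G.length : Int)
  set m : Int := ((G.headD []).length : Int)
  have hbridge : count_areas G
      = ((cellsL n m).foldl (fun st p => cellStepA G p.1 st p.2)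
          ((0 : Int), (PySem.Set.empty : PySem.Set (Int × Int)))).1 := by
    rw [count_areas, cellsL, ← foldl_prod_bridge]
    rfl
  obtain ⟨_, h2, h3, _, h5⟩ := scanA G (cellsL n m)
    (fun p hp => by rw [← toFinset_cellsL]; exact List.mem_toFinset.mpr hp)
    ((0 : Int), (PySem.Set.empty : PySem.Set (Int × Int)))
    (by intro x y hx; simp [PySem.Set.empty] at hx)
    (by simp [PySem.Set.empty])
    (by intro q hq; simp [PySem.Set.empty] at hq)
  rw [hbridge, h2]
  congr 1
  apply Finset.ext
  intro q
  constructor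
  · intro hq
    exact h5 q (List.mem_toFinset.mp hq)
  · intro hq
    refine List.mem_toFinset.mpr (h3 q ?_)
    rw [← toFinset_cellsL] at hq
    exact List.mem_toFinset.mp hq

-- ---------- B: the label sweeps reach the component-minimum fixpoint ----------

-- B's invariant: every cell's label is at most its own index and is the index of some
-- cell of its component
def InvB (G : List (List String)) (n m : Int) (L : PySem.Dict (Int × Int) Int) : Prop :=
  ∀ p : Int × Int, pvInb p.1 p.2 n m = true →
    L.getD p 0 ≤ idxL m p ∧ ∃ q ∈ comp G n m p, L.getD p 0 = idxL m q

-- the break condition: no equal-character neighbour holds a smaller label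
def FixB (G : List (List String)) (n m : Int) (L : PySem.Dict (Int × Int) Int) : Prop :=
  ∀ p q : Int × Int, pvInb p.1 p.2 n m = true → pvInb q.1 q.2 n m = true →
    q ∈ nbr4 p.1 p.2 → pvGet G q.1 q.2 = pvGet G p.1 p.2 →
    ¬ (L.getD q 0 < L.getD p 0)

-- the sum of all labels, the termination measure of the sweep loop
def PhiB (n m : Int) (L : PySem.Dict (Int × Int) Int) : Int :=
  ((cellsL n m).map (fun p => L.getD p 0)).sum

lemma sweepNbr_le (G : List (List String)) (n m r c : Int)
    (st : PySem.Dict (Int × Int) Int × Bool) (q : Int × Int) (p : Int × Int) :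
    (sweepNbr G n m r c st q).1.getD p 0 ≤ st.1.getD p 0 := by
  rw [sweepNbr]
  split_ifs with h
  · rw [Bool.and_eq_true, Bool.and_eq_true] at h
    have hlt := of_decide_eq_true h.2
    dsimp only
    rw [PySem.Dict.getD_insert]
    split_ifs with hp
    · rw [hp]; exact le_of_lt hlt
    · exact le_refl _
  · exact le_refl _

lemma sweepNbr_inv (G : List (List String)) (n m r c : Int)
    (st : PySem.Dict (Int × Int) Int × Bool) (q : Int × Int)
    (hrc : pvInb r c n m = true) (hq4 : q ∈ nbr4 r c)
    (hinv : InvB G n m st.1) : InvB G n m (sweepNbr G n m r c st q).1 := by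
  rw [sweepNbr]
  split_ifs with h
  · rw [Bool.and_eq_true, Bool.and_eq_true] at h
    obtain ⟨⟨hqin, hqc⟩, hlt⟩ := h
    have hlt' := of_decide_eq_true hlt
    intro p hp
    dsimp only
    rw [PySem.Dict.getD_insert]
    split_ifs with hpe
    · -- p = (r, c): the new label comes from a neighbour's component = p's component
      have hadj : adjOk G n m (r, c) q := ⟨hrc, hqin, hq4, eq_of_beq hqc⟩
      have hqcomp : q ∈ comp G n m (r, c) :=
        comp_closed G n m (mem_comp_self G n m (r, c) ((mem_gridF n m (r, c)).mpr hrc)) hadj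
      obtain ⟨hb, w, hw, hwv⟩ := hinv q hqin
      refine ⟨?_, w, ?_, hwv⟩
      · calc st.1.getD q 0 ≤ st.1.getD (r, c) 0 := le_of_lt hlt'
          _ ≤ idxL m (r, c) := (hinv (r, c) hrc).1
          _ = idxL m p := by rw [hpe]
      · rw [hpe, ← comp_congr G n m hqcomp]
        exact hw
    · exact hinv p hp
  · exact hinv

lemma nbrFold_le (G : List (List String)) (n m r c : Int) (qs : List (Int × Int)) :
    ∀ (st : PySem.Dict (Int × Int) Int × Bool) (p : Int × Int),
    (qs.foldl (sweepNbr G n m r c) st).1.getD p 0 ≤ st.1.getD p 0 := by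
  induction qs with
  | nil => intro st p; exact le_refl _
  | cons q qs ih =>
    intro st p
    rw [List.foldl_cons]
    exact le_trans (ih _ p) (sweepNbr_le G n m r c st q p)

lemma nbrFold_inv (G : List (List String)) (n m r c : Int) (qs : List (Int × Int))
    (hqs : ∀ q ∈ qs, q ∈ nbr4 r c) (hrc : pvInb r c n m = true) :
    ∀ (st : PySem.Dict (Int × Int) Int × Bool), InvB G n m st.1 →
    InvB G n m (qs.foldl (sweepNbr G n m r c) st).1 := by
  induction qs with
  | nil => intro st h; exact h
  | cons q qs ih =>
    intro st h
    rw [List.foldl_cons]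
    exact ih (fun q' hq' => hqs q' (List.mem_cons_of_mem _ hq'))
      _ (sweepNbr_inv G n m r c st q hrc (hqs q List.mem_cons_self) h)

lemma sweepNbr_flag (G : List (List String)) (n m r c : Int)
    (st : PySem.Dict (Int × Int) Int × Bool) (q : Int × Int) (h : st.2 = true) :
    (sweepNbr G n m r c st q).2 = true := by
  rw [sweepNbr]
  split_ifs <;> simp [h]

lemma nbrFold_flag (G : List (List String)) (n m r c : Int) (qs : List (Int × Int)) :
    ∀ (st : PySem.Dict (Int × Int) Int × Bool), st.2 = true →
    (qs.foldl (sweepNbr G n m r c) st).2 = true := by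
  induction qs with
  | nil => intro st h; exact h
  | cons q qs ih =>
    intro st h
    rw [List.foldl_cons]
    exact ih _ (sweepNbr_flag G n m r c st q h)

-- a neighbour fold that ends with the flag still down did nothing, and every check failed
lemma nbrFold_false (G : List (List String)) (n m r c : Int) (qs : List (Int × Int)) :
    ∀ (L : PySem.Dict (Int × Int) Int),
    (qs.foldl (sweepNbr G n m r c) (L, false)).2 = false →
    (qs.foldl (sweepNbr G n m r c) (L, false)).1 = L ∧
    ∀ q ∈ qs, (pvInb q.1 q.2 n m && (pvGet G q.1 q.2 == pvGet G r c)
        && decide (L.getD q 0 < L.getD (r, c) 0)) = false := by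
  induction qs with
  | nil => intro L _; exact ⟨rfl, by simp⟩
  | cons q qs ih =>
    intro L hfl
    rw [List.foldl_cons] at hfl ⊢
    by_cases hc : (pvInb q.1 q.2 n m && (pvGet G q.1 q.2 == pvGet G r c)
        && decide (L.getD q 0 < L.getD (r, c) 0)) = true
    · exfalso
      have hstep : sweepNbr G n m r c (L, false) q
          = (L.insert (r, c) (L.getD q 0), true) := by
        rw [sweepNbr, if_pos hc]
      rw [hstep] at hfl
      rw [nbrFold_flag G n m r c qs _ rfl] at hfl
      exact Bool.true_eq_false.mp hfl
    · have hstep : sweepNbr G n m r c (L, false) q = (L, false) := by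
        rw [sweepNbr, if_neg hc]
      rw [hstep] at hfl ⊢
      obtain ⟨h1, h2⟩ := ih L hfl
      refine ⟨h1, ?_⟩
      intro q' hq'
      rcases List.mem_cons.mp hq' with rfl | hq''
      · exact Bool.eq_false_iff.mpr hc
      · exact h2 q' hq''

lemma phi_lt_of_pointwise (n m : Int) (L L' : PySem.Dict (Int × Int) Int)
    (h : ∀ p, L'.getD p 0 ≤ L.getD p 0) (p : Int × Int) (hp : p ∈ cellsL n m)
    (hlt : L'.getD p 0 < L.getD p 0) : PhiB n m L' < PhiB n m L :=
  List.sum_lt_sum _ _ (fun q _ => h q) ⟨p, hp, hlt⟩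

lemma nbrFold_phi (G : List (List String)) (n m r c : Int) (qs : List (Int × Int))
    (hrc : pvInb r c n m = true) :
    ∀ (st : PySem.Dict (Int × Int) Int × Bool),
    PhiB n m (qs.foldl (sweepNbr G n m r c) st).1 ≤ PhiB n m st.1 ∧
    (st.2 = false → (qs.foldl (sweepNbr G n m r c) st).2 = true →
      PhiB n m (qs.foldl (sweepNbr G n m r c) st).1 < PhiB n m st.1) := by
  induction qs with
  | nil =>
    intro st
    simp only [List.foldl_nil]
    refine ⟨le_refl _, ?_⟩
    intro h1 h2
    rw [h1] at h2
    exact absurd h2 (by simp)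
  | cons q qs ih =>
    intro st
    rw [List.foldl_cons]
    rw [sweepNbr]
    split_ifs with hc
    · -- the check fired: the label at (r, c) strictly drops
      rw [Bool.and_eq_true, Bool.and_eq_true] at hc
      have hlt := of_decide_eq_true hc.2
      have hptwise : ∀ p, (st.1.insert (r, c) (st.1.getD q 0)).getD p 0 ≤ st.1.getD p 0 := by
        intro p
        rw [PySem.Dict.getD_insert]
        split_ifs with hp
        · rw [hp]; exact le_of_lt hlt
        · exact le_refl _
      have hstrict : PhiB n m (st.1.insert (r, c) (st.1.getD q 0)) < PhiB n m st.1 := by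
        refine phi_lt_of_pointwise n m st.1 _ hptwise (r, c)
          ((mem_cellsL n m (r, c)).mpr hrc) ?_
        rw [PySem.Dict.getD_insert, if_pos rfl]
        exact hlt
      have hrest := (ih (st.1.insert (r, c) (st.1.getD q 0), true)).1
      exact ⟨le_trans hrest (le_of_lt hstrict), fun _ _ => lt_of_le_of_lt hrest hstrict⟩
    · exact ih st

-- the grid fold of one sweep, over an arbitrary list of in-bounds cells
lemma cellFold_inv (G : List (List String)) (n m : Int) (ps : List (Int × Int))
    (hps : ∀ p ∈ ps, pvInb p.1 p.2 n m = true) :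
    ∀ (st : PySem.Dict (Int × Int) Int × Bool), InvB G n m st.1 →
    InvB G n m ((ps.foldl (fun st p => (nbr4 p.1 p.2).foldl (sweepNbr G n m p.1 p.2) st) st)).1 := by
  induction ps with
  | nil => intro st h; exact h
  | cons p ps ih =>
    intro st h
    rw [List.foldl_cons]
    exact ih (fun p' hp' => hps p' (List.mem_cons_of_mem _ hp')) _
      (nbrFold_inv G n m p.1 p.2 (nbr4 p.1 p.2) (fun q hq => hq) (hps p List.mem_cons_self) st h)

lemma cellFold_flag (G : List (List String)) (n m : Int) (ps : List (Int × Int)) :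
    ∀ (st : PySem.Dict (Int × Int) Int × Bool), st.2 = true →
    ((ps.foldl (fun st p => (nbr4 p.1 p.2).foldl (sweepNbr G n m p.1 p.2) st) st)).2 = true := by
  induction ps with
  | nil => intro st h; exact h
  | cons p ps ih =>
    intro st h
    rw [List.foldl_cons]
    exact ih _ (nbrFold_flag G n m p.1 p.2 _ st h)

lemma cellFold_false (G : List (List String)) (n m : Int) (ps : List (Int × Int)) :
    ∀ (L : PySem.Dict (Int × Int) Int),
    ((ps.foldl (fun st p => (nbr4 p.1 p.2).foldl (sweepNbr G n m p.1 p.2) st) (L, false))).2 = false →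
    ((ps.foldl (fun st p => (nbr4 p.1 p.2).foldl (sweepNbr G n m p.1 p.2) st) (L, false))).1 = L ∧
    ∀ p ∈ ps, ∀ q ∈ nbr4 p.1 p.2,
      (pvInb q.1 q.2 n m && (pvGet G q.1 q.2 == pvGet G p.1 p.2)
        && decide (L.getD q 0 < L.getD p 0)) = false := by
  induction ps with
  | nil => intro L _; exact ⟨rfl, by simp⟩
  | cons p ps ih =>
    intro L hfl
    rw [List.foldl_cons] at hfl ⊢
    rcases hb : ((nbr4 p.1 p.2).foldl (sweepNbr G n m p.1 p.2) (L, false)) with ⟨L', b⟩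
    cases b with
    | true =>
      exfalso
      rw [hb] at hfl
      rw [cellFold_flag G n m ps _ rfl] at hfl
      exact Bool.true_eq_false.mp hfl
    | false =>
      obtain ⟨h1, h2⟩ := nbrFold_false G n m p.1 p.2 (nbr4 p.1 p.2) L (by rw [hb])
      rw [hb] at h1
      dsimp only at h1
      subst h1
      rw [hb] at hfl
      obtain ⟨h1', h2'⟩ := ih L' hfl
      refine ⟨h1', ?_⟩
      intro p' hp' q hq
      rcases List.mem_cons.mp hp' with rfl | hp''
      · exact h2 q hq
      · exact h2' p' hp'' q hq

lemma cellFold_phi (G : List (List String)) (n m : Int) (ps : List (Int × Int))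
    (hps : ∀ p ∈ ps, pvInb p.1 p.2 n m = true) :
    ∀ (st : PySem.Dict (Int × Int) Int × Bool),
    PhiB n m ((ps.foldl (fun st p => (nbr4 p.1 p.2).foldl (sweepNbr G n m p.1 p.2) st) st)).1
      ≤ PhiB n m st.1 ∧
    (st.2 = false →
      ((ps.foldl (fun st p => (nbr4 p.1 p.2).foldl (sweepNbr G n m p.1 p.2) st) st)).2 = true →
      PhiB n m ((ps.foldl (fun st p => (nbr4 p.1 p.2).foldl (sweepNbr G n m p.1 p.2) st) st)).1
        < PhiB n m st.1) := by
  induction ps with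
  | nil =>
    intro st
    simp only [List.foldl_nil]
    refine ⟨le_refl _, ?_⟩
    intro h1 h2
    rw [h1] at h2
    exact absurd h2 (by simp)
  | cons p ps ih =>
    intro st
    rw [List.foldl_cons]
    have hple : ∀ p', ((nbr4 p.1 p.2).foldl (sweepNbr G n m p.1 p.2) st).1.getD p' 0
        ≤ st.1.getD p' 0 := nbrFold_le G n m p.1 p.2 _ st
    have hphile : PhiB n m ((nbr4 p.1 p.2).foldl (sweepNbr G n m p.1 p.2) st).1 ≤ PhiB n m st.1 :=
      (nbrFold_phi G n m p.1 p.2 _ (hps p List.mem_cons_self) st).1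
    have hrest := ih (fun p' hp' => hps p' (List.mem_cons_of_mem _ hp'))
      ((nbr4 p.1 p.2).foldl (sweepNbr G n m p.1 p.2) st)
    refine ⟨le_trans hrest.1 hphile, ?_⟩
    intro hf ht
    rcases hb : ((nbr4 p.1 p.2).foldl (sweepNbr G n m p.1 p.2) st).2 with _ | _
    · -- the inner fold left the flag down: strictness comes from the tail
      have := hrest.2 (by rw [hb]) ht
      exact lt_of_lt_of_le this hphile
    · -- the inner fold raised the flag: it already dropped Phi
      have hstrict := (nbrFold_phi G n m p.1 p.2 _ (hps p List.mem_cons_self) st).2 hf hb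
      exact lt_of_le_of_lt hrest.1 hstrict

-- ---------- B: running the sweep loop ----------

lemma sweepOnce_eq (G : List (List String)) (n m : Int) (lbl : PySem.Dict (Int × Int) Int) :
    sweepOnce G n m lbl
      = (cellsL n m).foldl
          (fun st p => (nbr4 p.1 p.2).foldl (sweepNbr G n m p.1 p.2) st) (lbl, false) := by
  rw [sweepOnce, cellsL, ← foldl_prod_bridge]

lemma fix_of_sweep_false (G : List (List String)) (n m : Int)
    (L : PySem.Dict (Int × Int) Int) (h : (sweepOnce G n m L).2 = false) :
    (sweepOnce G n m L).1 = L ∧ FixB G n m L := by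
  rw [sweepOnce_eq] at h ⊢
  obtain ⟨h1, h2⟩ := cellFold_false G n m (cellsL n m) L h
  refine ⟨h1, ?_⟩
  intro p q hp hq hnbr hchar hlt
  have := h2 p ((mem_cellsL n m p).mpr hp) q hnbr
  rw [hq, beq_iff_eq.mpr hchar, decide_eq_true hlt] at this
  simp at this

lemma iter_done (G : List (List String)) (n m : Int) (ks : List Int) :
    ∀ (M : PySem.Dict (Int × Int) Int), ks.foldl (sweepIter G n m) (M, true) = (M, true) := by
  induction ks with
  | nil => intro M; rfl
  | cons k ks ih =>
    intro M
    rw [List.foldl_cons]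
    have : sweepIter G n m (M, true) k = (M, true) := by rw [sweepIter]; simp
    rw [this, ih]

lemma loopB (G : List (List String)) (n m : Int) :
    ∀ (ks : List Int) (L : PySem.Dict (Int × Int) Int), InvB G n m L →
    InvB G n m (ks.foldl (sweepIter G n m) (L, false)).1
    ∧ ((ks.foldl (sweepIter G n m) (L, false)).2 = true →
        FixB G n m (ks.foldl (sweepIter G n m) (L, false)).1)
    ∧ ((ks.foldl (sweepIter G n m) (L, false)).2 = false →
        PhiB n m (ks.foldl (sweepIter G n m) (L, false)).1 + ks.length ≤ PhiB n m L) := by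
  intro ks
  induction ks with
  | nil =>
    intro L hinv
    refine ⟨hinv, ?_, ?_⟩
    · intro h; simp at h
    · intro _; simp
  | cons k ks ih =>
    intro L hinv
    rw [List.foldl_cons]
    have hstep : sweepIter G n m (L, false) k = ((sweepOnce G n m L).1, !(sweepOnce G n m L).2) := by
      rw [sweepIter]; simp
    rw [hstep]
    rcases hflag : (sweepOnce G n m L).2 with _ | _
    · -- no change: the break fires, the labels are already a fixpoint
      obtain ⟨h1, h2⟩ := fix_of_sweep_false G n m L hflag
      simp only [h1, Bool.not_false]
      rw [iter_done]
      exact ⟨hinv, fun _ => h2, fun h => by simp at h⟩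
    · -- something changed: Phi strictly dropped, recurse
      have hinv' : InvB G n m (sweepOnce G n m L).1 := by
        rw [sweepOnce_eq]
        exact cellFold_inv G n m (cellsL n m) (fun p hp => (mem_cellsL n m p).mp hp) _ hinv
      have hphi : PhiB n m (sweepOnce G n m L).1 < PhiB n m L := by
        have := (cellFold_phi G n m (cellsL n m) (fun p hp => (mem_cellsL n m p).mp hp)
          (L, false)).2 rfl (by rw [← sweepOnce_eq]; exact hflag)
        rw [← sweepOnce_eq] at this
        exact this
      simp only [Bool.not_true]
      obtain ⟨i1, i2, i3⟩ := ih (sweepOnce G n m L).1 hinv'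
      refine ⟨i1, i2, ?_⟩
      intro h
      have := i3 h
      have hlen : ((ks.length + 1 : Nat) : Int) = (ks.length : Int) + 1 := by push_cast; ring
      simp only [List.length_cons, hlen]
      omega

-- ---------- B: initial labels ----------

lemma getD_initFold (m : Int) (ps : List (Int × Int)) :
    ∀ (L : PySem.Dict (Int × Int) Int) (p : Int × Int),
    (ps.foldl (fun L q => L.insert q (idxL m q)) L).getD p 0
      = if p ∈ ps then idxL m p else L.getD p 0 := by
  induction ps with
  | nil => intro L p; simp
  | cons q ps ih =>
    intro L p
    rw [List.foldl_cons, ih]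
    by_cases hps : p ∈ ps
    · simp [hps]
    · rw [if_neg hps, PySem.Dict.getD_insert]
      by_cases hpq : p = q
      · rw [if_pos hpq, if_pos (by simp [hpq]), hpq]
      · rw [if_neg hpq, if_neg (by simp [hpq, hps])]

lemma initLabels_eq (n m : Int) :
    initLabels n m
      = (cellsL n m).foldl (fun L p => L.insert p (idxL m p)) PySem.Dict.empty := by
  rw [initLabels, cellsL, ← foldl_prod_bridge]
  rfl

lemma initLabels_getD (n m : Int) (p : Int × Int) (hp : pvInb p.1 p.2 n m = true) :
    (initLabels n m).getD p 0 = idxL m p := by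
  rw [initLabels_eq, getD_initFold, if_pos ((mem_cellsL n m p).mpr hp)]

lemma initLabels_inv (G : List (List String)) (n m : Int) : InvB G n m (initLabels n m) := by
  intro p hp
  rw [initLabels_getD n m p hp]
  exact ⟨le_refl _, p, mem_comp_self G n m p ((mem_gridF n m p).mpr hp), rfl⟩

lemma idx_nonneg (n m : Int) (p : Int × Int) (hp : pvInb p.1 p.2 n m = true) :
    0 ≤ idxL m p := by
  simp only [pvInb, decide_eq_true_eq] at hp
  have : 0 ≤ p.1 * m := mul_nonneg hp.1 (le_of_lt (lt_of_le_of_lt hp.2.2.1 hp.2.2.2))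
  simp only [idxL]
  omega

lemma idx_le (n m : Int) (p : Int × Int) (hp : pvInb p.1 p.2 n m = true) :
    idxL m p ≤ n * m - 1 := by
  simp only [pvInb, decide_eq_true_eq] at hp
  simp only [idxL]
  nlinarith [hp.1, hp.2.1, hp.2.2.1, hp.2.2.2]

lemma phi_nonneg (G : List (List String)) (n m : Int) (L : PySem.Dict (Int × Int) Int)
    (hinv : InvB G n m L) : 0 ≤ PhiB n m L := by
  apply List.sum_nonneg
  intro x hx
  obtain ⟨p, hp, rfl⟩ := List.mem_map.mp hx
  obtain ⟨_, q, hq, hv⟩ := hinv p ((mem_cellsL n m p).mp hp)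
  rw [hv]
  exact idx_nonneg n m q ((mem_gridF n m q).mp (comp_subset_grid G n m p hq))

lemma length_cellsL (n m : Int) : (cellsL n m).length = n.toNat * m.toNat := by
  rw [cellsL, List.length_product, PySem.List.length_pyRange_one, PySem.List.length_pyRange_one]
  norm_num

lemma phi_init_le (n m : Int) :
    PhiB n m (initLabels n m) ≤ ((cellsL n m).length : Int) * (n * m - 1)
      ∨ (cellsL n m) = [] := by
  rcases List.eq_nil_or_concat (cellsL n m) with h | _
  · exact Or.inr h
  all_goals
  · left
    have h1 : ∀ x ∈ (cellsL n m).map (fun p => (initLabels n m).getD p 0), x ≤ n * m - 1 := by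
      intro x hx
      obtain ⟨p, hp, rfl⟩ := List.mem_map.mp hx
      have hinb := (mem_cellsL n m p).mp hp
      rw [initLabels_getD n m p hinb]
      exact idx_le n m p hinb
    have := List.sum_le_card_nsmul _ _ h1
    simpa [PhiB] using this

-- the loop always ends in the label fixpoint
lemma runSweeps_fix (G : List (List String)) (n m : Int) :
    InvB G n m (runSweeps G n m) ∧ FixB G n m (runSweeps G n m) := by
  obtain ⟨i1, i2, i3⟩ := loopB G n m (PySem.List.pyRange 0 (n * m * n * m) 1)
    (initLabels n m) (initLabels_inv G n m)
  rw [runSweeps]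
  rcases hflag : ((PySem.List.pyRange 0 (n * m * n * m) 1).foldl (sweepIter G n m)
      (initLabels n m, false)).2 with _ | _
  · -- the loop ran out of fuel without stabilising: impossible by the Phi count
    refine ⟨i1, ?_⟩
    by_cases hnm : 0 < n ∧ 0 < m
    · exfalso
      have hlen : ((PySem.List.pyRange 0 (n * m * n * m) 1).length : Int) = n * m * n * m := by
        rw [PySem.List.length_pyRange_one]
        have : (0 : Int) ≤ n * m * n * m := by nlinarith [sq_nonneg (n * m)]
        omega
      have h3 := i3 hflag
      rw [hlen] at h3
      have h0 : 0 ≤ PhiB n m ((PySem.List.pyRange 0 (n * m * n * m) 1).foldl (sweepIter G n m)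
          (initLabels n m, false)).1 := phi_nonneg G n m _ i1
      rcases phi_init_le n m with hle | hnil
      · rw [length_cellsL] at hle
        have hc1 : ((n.toNat : Int)) = n := Int.toNat_of_nonneg (le_of_lt hnm.1)
        have hc2 : ((m.toNat : Int)) = m := Int.toNat_of_nonneg (le_of_lt hnm.2)
        have hle' : PhiB n m (initLabels n m) ≤ n * m * (n * m - 1) := by
          calc PhiB n m (initLabels n m) ≤ ((n.toNat * m.toNat : Nat) : Int) * (n * m - 1) := hle
            _ = n * m * (n * m - 1) := by push_cast [hc1, hc2]; ring
        nlinarith [hnm.1, hnm.2]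
      · have : (cellsL n m).length = 0 := by rw [hnil]; rfl
        rw [length_cellsL] at this
        have : n.toNat = 0 ∨ m.toNat = 0 := by
          rcases Nat.mul_eq_zero.mp this with h | h
          · exact Or.inl h
          · exact Or.inr h
        omega
    · -- degenerate grid: no cell is in bounds, the fixpoint is vacuous
      intro p q hp _ _ _
      simp only [pvInb, decide_eq_true_eq] at hp
      exact absurd ⟨by omega, by omega⟩ hnm
  · exact ⟨i1, i2 hflag⟩

-- ---------- B: the fixpoint labels are the component minima ----------

lemma fix_const (G : List (List String)) (n m : Int) (L : PySem.Dict (Int × Int) Int)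
    (hfix : FixB G n m L) {p q : Int × Int} (h : Reach G n m p q) :
    L.getD q 0 = L.getD p 0 := by
  induction h with
  | refl => rfl
  | @tail b c _ hbc ih =>
    have h1 := hfix b c hbc.1 hbc.2.1 hbc.2.2.1 hbc.2.2.2
    have hsym := adjOk_symm G n m hbc
    have h2 := hfix c b hsym.1 hsym.2.1 hsym.2.2.1 hsym.2.2.2
    omega

lemma labels_min (G : List (List String)) (n m : Int) (L : PySem.Dict (Int × Int) Int)
    (hfix : FixB G n m L) (hinv : InvB G n m L) (p : Int × Int)
    (hp : pvInb p.1 p.2 n m = true) : L.getD p 0 = minIdx m (comp G n m p) := by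
  have hpg : p ∈ gridF n m := (mem_gridF n m p).mpr hp
  have hne : (comp G n m p).Nonempty := ⟨p, mem_comp_self G n m p hpg⟩
  obtain ⟨w, hw, hwv⟩ := minIdx_mem m (comp G n m p) hne
  obtain ⟨_, q0, hq0, hq0v⟩ := hinv p hp
  have hmle : minIdx m (comp G n m p) ≤ L.getD p 0 := by
    rw [hq0v]
    exact minIdx_le m _ hq0
  have hconst : L.getD w 0 = L.getD p 0 :=
    fix_const G n m L hfix ((mem_comp G n m p w).mp hw).2
  have hwle : L.getD w 0 ≤ idxL m w :=
    (hinv w ((mem_gridF n m w).mp (comp_subset_grid G n m p hw))).1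
  omega

-- ---------- B: the size pass counts component sizes ----------

lemma sizeDict_getD (n m : Int) (L : PySem.Dict (Int × Int) Int) (v : Int) :
    (sizeDict n m L).getD v 0
      = (((cellsL n m).map (fun p => L.getD p 0)).count v : Int) := by
  have heq : sizeDict n m L
      = (cellsL n m).foldl
          (fun d p => d.insert (L.getD p 0) (d.getD (L.getD p 0) 0 + 1)) PySem.Dict.empty := by
    rw [sizeDict, cellsL, ← foldl_prod_bridge]
  have heq2 : sizeDict n m L
      = ((cellsL n m).map (fun p => L.getD p 0)).foldl
          (fun d x => d.insert x (d.getD x 0 + 1)) PySem.Dict.empty := by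
    rw [heq, List.foldl_map]
  rw [heq2, PySem.Dict.getD_foldl_insert_add_one]
  simp

lemma minIdx_eq_iff (G : List (List String)) (n m : Int) {p q : Int × Int}
    (hp : p ∈ gridF n m) (hq : q ∈ gridF n m) :
    minIdx m (comp G n m q) = minIdx m (comp G n m p) ↔ q ∈ comp G n m p := by
  constructor
  · intro h
    obtain ⟨w, hw, hwv⟩ := minIdx_mem m (comp G n m q) ⟨q, mem_comp_self G n m q hq⟩
    obtain ⟨w', hw', hwv'⟩ := minIdx_mem m (comp G n m p) ⟨p, mem_comp_self G n m p hp⟩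
    have hww : w = w' := idx_inj n m (comp_subset_grid G n m q hw)
      (comp_subset_grid G n m p hw') (by rw [hwv, hwv', h])
    have h1 : comp G n m q = comp G n m p := by
      rw [← comp_congr G n m hw, hww, comp_congr G n m hw']
    rw [← h1]
    exact mem_comp_self G n m q hq
  · intro h
    rw [comp_congr G n m h]

lemma count_label_card (G : List (List String)) (n m : Int)
    (L : PySem.Dict (Int × Int) Int)
    (hlab : ∀ q : Int × Int, pvInb q.1 q.2 n m = true →
      L.getD q 0 = minIdx m (comp G n m q))
    (p : Int × Int) (hp : pvInb p.1 p.2 n m = true) :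
    ((cellsL n m).map (fun q => L.getD q 0)).count (L.getD p 0) = (comp G n m p).card := by
  have h1 : ((cellsL n m).map (fun q => L.getD q 0)).count (L.getD p 0)
      = (cellsL n m).countP (fun q => L.getD q 0 == L.getD p 0) := by
    simp [List.count, List.countP_map]
    rfl
  rw [h1, List.countP_eq_length_filter]
  have hnd : ((cellsL n m).filter (fun q => L.getD q 0 == L.getD p 0)).Nodup :=
    List.Nodup.filter _ (nodup_cellsL n m)
  rw [← List.toFinset_card_of_nodup hnd, List.toFinset_filter]
  congr 1
  apply Finset.ext
  intro q
  rw [Finset.mem_filter, toFinset_cellsL]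
  constructor
  · rintro ⟨hqg, hbeq⟩
    have heq : L.getD q 0 = L.getD p 0 := beq_iff_eq.mp hbeq
    rw [hlab q ((mem_gridF n m q).mp hqg), hlab p hp] at heq
    exact (minIdx_eq_iff G n m ((mem_gridF n m p).mpr hp) hqg).mp heq
  · intro hqc
    have hqg := comp_subset_grid G n m p hqc
    refine ⟨hqg, ?_⟩
    have : L.getD q 0 = L.getD p 0 := by
      rw [hlab q ((mem_gridF n m q).mp hqg), hlab p hp]
      exact (minIdx_eq_iff G n m ((mem_gridF n m p).mpr hp) hqg).mpr hqc
    simp [this]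

-- ---------- the two corner formulas agree ----------

-- one direction-pair's corner contribution (shared shape of A's two terms and B's branch)
def cpB (G : List (List String)) (char : String) (n m x y : Int) (d1 d2 : Int × Int) : Int :=
  if is_convex (x + d1.1) (y + d1.2) n m G char
      && is_convex (x + d2.1) (y + d2.2) n m G char then 1
  else if !(is_convex (x + d1.1) (y + d1.2) n m G char)
      && !(is_convex (x + d2.1) (y + d2.2) n m G char)
      && is_convex (x + d1.1 + d2.1) (y + d1.2 + d2.2) n m G char then 1
  else 0

lemma cpB_comm (G : List (List String)) (char : String) (n m x y : Int) (d1 d2 : Int × Int) :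
    cpB G char n m x y d1 d2 = cpB G char n m x y d2 d1 := by
  have e1 : x + d2.1 + d1.1 = x + d1.1 + d2.1 := by ring
  have e2 : y + d2.2 + d1.2 = y + d1.2 + d2.2 := by ring
  rw [cpB, cpB, e1, e2]
  cases is_convex (x + d1.1) (y + d1.2) n m G char <;>
    cases is_convex (x + d2.1) (y + d2.2) n m G char <;>
    cases is_convex (x + d1.1 + d2.1) (y + d1.2 + d2.2) n m G char <;> simp

lemma contribA_eq_cpB (G : List (List String)) (char : String) (n m x y : Int) (i : Nat) :
    contribA G char n m x y i
      = cpB G char n m x y (pvDirs.getD i (0, 0)) (pvDirs.getD ((i + 1) % 4) (0, 0)) := rfl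

lemma cornersB_step (G : List (List String)) (r c n m : Int) (cnt : Int)
    (pq : (Int × Int) × (Int × Int)) :
    (fun cnt pq =>
      let a := diffB G n m r c (r + pq.1.1) (c + pq.1.2)
      let b := diffB G n m r c (r + pq.2.1) (c + pq.2.2)
      if a && b then cnt + 1
      else if !a && !b && diffB G n m r c (r + pq.1.1 + pq.2.1) (c + pq.1.2 + pq.2.2) then cnt + 1
      else cnt) cnt pq
      = cnt + cpB G (pvGet G r c) n m r c pq.1 pq.2 := by
  have hd : ∀ x y : Int, diffB G n m r c x y = is_convex x y n m G (pvGet G r c) := fun _ _ => rfl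
  dsimp only
  rw [hd, hd, hd, cpB]
  split_ifs <;> simp

lemma cornersB_eq_cornersA (G : List (List String)) (r c n m : Int) :
    cornersB G r c n m = cornersA G (pvGet G r c) n m r c := by
  have hB : cornersB G r c n m
      = cpB G (pvGet G r c) n m r c (-1, 0) (0, 1) + cpB G (pvGet G r c) n m r c (0, 1) (1, 0)
        + cpB G (pvGet G r c) n m r c (1, 0) (0, -1)
        + cpB G (pvGet G r c) n m r c (0, -1) (-1, 0) := by
    have hfun : (fun (cnt : Int) (pq : (Int × Int) × (Int × Int)) =>
        let a := diffB G n m r c (r + pq.1.1) (c + pq.1.2)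
        let b := diffB G n m r c (r + pq.2.1) (c + pq.2.2)
        if a && b then cnt + 1
        else if !a && !b && diffB G n m r c (r + pq.1.1 + pq.2.1) (c + pq.1.2 + pq.2.2) then
          cnt + 1
        else cnt)
        = fun cnt pq => cnt + cpB G (pvGet G r c) n m r c pq.1 pq.2 := by
      funext cnt pq
      exact cornersB_step G r c n m cnt pq
    rw [cornersB, hfun, PySem.List.foldl_add, zero_add, cornerPairs]
    simp only [List.map_cons, List.map_nil, List.sum_cons, List.sum_nil]
    ring
  have hA : cornersA G (pvGet G r c) n m r c
      = cpB G (pvGet G r c) n m r c (1, 0) (0, 1) + cpB G (pvGet G r c) n m r c (0, 1) (-1, 0)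
        + cpB G (pvGet G r c) n m r c (-1, 0) (0, -1)
        + cpB G (pvGet G r c) n m r c (0, -1) (1, 0) := by
    rw [cornersA]
    rw [List.map_cons, List.map_cons, List.map_cons, List.map_cons, List.map_nil]
    rw [contribA_eq_cpB, contribA_eq_cpB, contribA_eq_cpB, contribA_eq_cpB]
    show cpB G (pvGet G r c) n m r c (pvDirs.getD 0 (0, 0)) (pvDirs.getD 1 (0, 0))
        + (cpB G (pvGet G r c) n m r c (pvDirs.getD 1 (0, 0)) (pvDirs.getD 2 (0, 0))
        + (cpB G (pvGet G r c) n m r c (pvDirs.getD 2 (0, 0)) (pvDirs.getD 3 (0, 0))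
        + (cpB G (pvGet G r c) n m r c (pvDirs.getD 3 (0, 0)) (pvDirs.getD 0 (0, 0)) + 0))) = _
    simp only [pvDirs, List.getD]
    norm_num
    ring
  rw [hB, hA, cpB_comm G (pvGet G r c) n m r c (-1, 0) (0, 1),
    cpB_comm G (pvGet G r c) n m r c (0, 1) (1, 0),
    cpB_comm G (pvGet G r c) n m r c (1, 0) (0, -1),
    cpB_comm G (pvGet G r c) n m r c (0, -1) (-1, 0)]
  ring

-- ---------- B's whole result, as a sum over the grid ----------

lemma countAlt_eq_sum (G : List (List String)) :
    count_areas_alt G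
      = ∑ p ∈ gridF (G.length : Int) ((G.headD []).length : Int),
          fval G (G.length : Int) ((G.headD []).length : Int) p := by
  have hmif : (if G ≠ [] then ((G.headD []).length : Int) else 0)
      = ((G.headD []).length : Int) := by
    by_cases hG : G = []
    · simp [hG]
    · simp [hG]
  rw [count_areas_alt]
  simp only [hmif]
  obtain ⟨hinv, hfix⟩ := runSweeps_fix G (G.length : Int) ((G.headD []).length : Int)
  have hlab : ∀ q : Int × Int,
      pvInb q.1 q.2 (G.length : Int) ((G.headD []).length : Int) = true →
      (runSweeps G (G.length : Int) ((G.headD []).length : Int)).getD q 0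
        = minIdx ((G.headD []).length : Int)
            (comp G (G.length : Int) ((G.headD []).length : Int) q) :=
    fun q hq => labels_min G _ _ _ hfix hinv q hq
  refine Eq.trans (foldl_prod_bridge (PySem.List.pyRange 0 (G.length : Int) 1)
      (PySem.List.pyRange 0 ((G.headD []).length : Int) 1)
      (fun tot p => tot + cornersB G p.1 p.2 (G.length : Int) ((G.headD []).length : Int)
        * (sizeDict (G.length : Int) ((G.headD []).length : Int)
            (runSweeps G (G.length : Int) ((G.headD []).length : Int))).getD
          ((runSweeps G (G.length : Int) ((G.headD []).length : Int)).getD p 0) 0) 0) ?_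
  rw [← cellsL]
  rw [PySem.List.foldl_add, zero_add]
  have hcong : ∀ p ∈ cellsL (G.length : Int) ((G.headD []).length : Int),
      cornersB G p.1 p.2 (G.length : Int) ((G.headD []).length : Int)
          * (sizeDict (G.length : Int) ((G.headD []).length : Int)
              (runSweeps G (G.length : Int) ((G.headD []).length : Int))).getD
            ((runSweeps G (G.length : Int) ((G.headD []).length : Int)).getD p 0) 0
        = fval G (G.length : Int) ((G.headD []).length : Int) p := by
    intro p hp
    have hinb := (mem_cellsL (G.length : Int) ((G.headD []).length : Int) p).mp hp
    rw [sizeDict_getD, count_label_card G _ _ _ hlab p hinb, cornersB_eq_cornersA, fval]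
  rw [List.map_congr_left hcong,
    ← List.sum_toFinset _ (nodup_cellsL (G.length : Int) ((G.headD []).length : Int)),
    toFinset_cellsL]

-- ===== VERDICT (by name: the statement is the Claim_ definition above) =====
theorem count_areas_spec : Claim_equal_count_areas := by
  intro G _ _
  unfold Spec_count_areas
  rw [countA_eq_sum, countAlt_eq_sum]
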